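-- pv_equiv track=rewrite | github.com/AhYoon-Kwon/algorithm-study | 12.27/programmers뉴스클러스터링_김보경.py | multiset
-- ===== SOURCE A (Python) =====
-- def multiset(first, second):
--     first_copy = first.copy()
--     first_result = first.copy()
--     for i in second:
--         if i not in first_copy:
--             first_result.append(i)
--         else:
--             first_copy.remove(i)
--     return first_result
-- ===== SOURCE B (Python) =====
-- def multiset(first, second):
--     # An occurrence of s at index j of second is an "extra" exactly when the
--     # number of occurrences of s in second[:j+1] exceeds first.count(s):
--     # A's shrinking copy absorbs the first first.count(s) occurrences.
--     return first + [s for j, s in enumerate(second)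
--                     if second[:j + 1].count(s) > first.count(s)]
-- ===== Notes on version B (the rewrite author's own statement) =====
-- stated objective: simpler
-- what changed: Replaced A's stateful simulation (a shrinking mutable copy of first with membership tests and remove calls, plus an appended result list) by a stateless closed-form characterisation: an element of second is kept iff its occurrence index in second exceeds its count in first, expressed as a single comprehension over enumerate(second).
import Mathlib
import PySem

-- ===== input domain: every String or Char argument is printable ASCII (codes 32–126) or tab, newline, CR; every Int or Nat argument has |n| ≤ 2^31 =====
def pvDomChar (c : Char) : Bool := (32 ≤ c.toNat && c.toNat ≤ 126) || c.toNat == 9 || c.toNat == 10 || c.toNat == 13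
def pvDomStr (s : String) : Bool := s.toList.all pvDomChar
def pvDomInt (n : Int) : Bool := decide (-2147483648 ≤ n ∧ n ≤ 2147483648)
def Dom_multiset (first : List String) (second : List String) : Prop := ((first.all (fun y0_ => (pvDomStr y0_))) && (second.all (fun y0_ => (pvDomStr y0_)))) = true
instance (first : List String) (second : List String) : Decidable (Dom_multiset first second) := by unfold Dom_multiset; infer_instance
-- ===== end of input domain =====

-- B replaces A's stateful simulation (shrinking copy, membership test, remove) by a
-- stateless closed form: second[j] is an extra iff second[:j+1].count(s) > first.count(s).

-- ===== PORT A =====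
def multiset (first : List String) (second : List String) : List String :=
  (second.foldl (fun (st : List String × List String) i =>
      if st.1.contains i = false then (st.1, st.2 ++ [i])
      else (((PySem.List.remove? st.1 i).getD st.1), st.2))
    (first, first)).2

-- ===== PORT B =====
def multiset_alt (first : List String) (second : List String) : List String :=
  first ++ ((PySem.List.enumerate second 0).filter
      (fun js => PySem.List.count first js.2 <
        PySem.List.count (PySem.List.slice second none (some (js.1 + 1))) js.2)).map (·.2)

-- ===== PRECONDITION & SPEC =====
def Spec_multiset (first : List String) (second : List String) (out : List String) : Prop := out = multiset_alt first second
instance (first : List String) (second : List String) (out : List String) : Decidable (Spec_multiset first second out) := by unfold Spec_multiset; infer_instance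

-- ===== CLAIM (what is proved, stated in full; the proofs are below) =====
def Claim_equal_multiset : Prop := ∀ (first : List String) (second : List String), Dom_multiset first second → Spec_multiset first second (multiset first second)

-- ===== LEMMAS AND PROOFS =====

-- reference description of the extras: process rest with prefix p already seen
def pvExtras (first p rest : List String) : List String :=
  match rest with
  | [] => []
  | i :: r =>
    if first.count i ≤ p.count i then i :: pvExtras first (p ++ [i]) r
    else pvExtras first (p ++ [i]) r

-- A's fold produces acc ++ pvExtras, given the count invariant on its copy
theorem pvMainA (first : List String) (rest : List String) :
    ∀ (p copy acc : List String), (∀ s : String, copy.count s = first.count s - p.count s) →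
    (rest.foldl (fun (st : List String × List String) i =>
        if st.1.contains i = false then (st.1, st.2 ++ [i])
        else (((PySem.List.remove? st.1 i).getD st.1), st.2)) (copy, acc)).2
      = acc ++ pvExtras first p rest := by
  induction rest with
  | nil => intro p copy acc _; simp [pvExtras]
  | cons i r ih =>
    intro p copy acc hinv
    simp only [List.foldl_cons, pvExtras]
    by_cases hmem : i ∈ copy
    · have hpos : 0 < copy.count i := List.count_pos_iff.mpr hmem
      have hlt : p.count i < first.count i := by have := hinv i; omega
      rw [if_neg (by simp [hmem]), PySem.List.remove?_eq_some_erase copy i hmem]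
      simp only [Option.getD_some]
      rw [if_neg (by omega)]
      exact ih (p ++ [i]) (copy.erase i) acc (fun s => by
        by_cases hsi : s = i
        · subst hsi
          rw [List.count_erase_self, hinv s]
          simp; omega
        · rw [List.count_erase_of_ne hsi, hinv s]
          have h2 : ¬ (i = s) := fun h => hsi h.symm
          simp [List.count_append, h2])
    · have h0 : copy.count i = 0 := List.count_eq_zero_of_not_mem hmem
      have hle : first.count i ≤ p.count i := by have := hinv i; omega
      rw [if_pos (by simp [hmem]), if_pos hle]
      rw [ih (p ++ [i]) copy (acc ++ [i]) (fun s => by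
        by_cases hsi : s = i
        · subst hsi
          rw [hinv s] at h0 ⊢
          simp; omega
        · rw [hinv s]
          have h2 : ¬ (i = s) := fun h => hsi h.symm
          simp [List.count_append, h2])]
      simp

-- B's enumerate/filter comprehension produces pvExtras
theorem pvMainB (first second : List String) :
    ∀ (rest p : List String), second = p ++ rest →
    ((PySem.List.enumerate rest (p.length : Int)).filter
        (fun js => PySem.List.count first js.2 <
          PySem.List.count (PySem.List.slice second none (some (js.1 + 1))) js.2)).map (·.2)
      = pvExtras first p rest := by
  intro rest
  induction rest with
  | nil => intro p _; simp [pvExtras, PySem.List.enumerate_nil]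
  | cons i r ih =>
    intro p hsec
    rw [PySem.List.enumerate_cons]
    have htake : PySem.List.slice second none (some ((p.length : Int) + 1)) = p ++ [i] := by
      have : ((p.length : Int) + 1) = ((p.length + 1 : Nat) : Int) := by push_cast; ring
      rw [this, PySem.List.slice_to_natCast, hsec]
      rw [List.take_append]
      simp
    simp only [List.filter_cons]
    by_cases hc : first.count i ≤ p.count i
    · rw [if_pos (by
        simp [htake, PySem.List.count_eq, List.count_append]; omega)]
      simp only [List.map_cons, pvExtras, if_pos hc]
      congr 1
      have : ((p.length : Int) + 1) = (((p ++ [i]).length : Nat) : Int) := by simp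
      rw [this]
      exact ih (p ++ [i]) (by simp [hsec])
    · rw [if_neg (by
        simp [htake, PySem.List.count_eq, List.count_append]; omega)]
      simp only [pvExtras, if_neg hc]
      have : ((p.length : Int) + 1) = (((p ++ [i]).length : Nat) : Int) := by simp
      rw [this]
      exact ih (p ++ [i]) (by simp [hsec])

-- ===== VERDICT (by name: the statement is the Claim_ definition above) =====
theorem multiset_spec : Claim_equal_multiset := by
  intro first second _
  unfold Spec_multiset multiset multiset_alt
  rw [pvMainA first second [] first first (fun s => by simp)]
  rw [show ((0 : Int)) = (([] : List String).length : Int) by simp]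
  rw [pvMainB first second second [] (by simp)]
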